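-- pv_equiv track=rewrite | github.com/HectorAndrade88/us_visa_scheduler | visa.py | is_transient_network_failure
-- ===== SOURCE A (Python) =====
-- import unicodedata
--
-- def is_transient_network_failure(error_text):
--     normalized = normalize_lookup_text(error_text)
--     markers = [
--         "invalidjsonresponse",
--         "jsondecodeerror",
--         "expecting value",
--         "content-type=text/html",
--         "connectionerror",
--         "proxyerror",
--         "newconnectionerror",
--         "httpsconnectionpool",
--         "max retries exceeded",
--         "failed to establish a new connection",
--         "connection refused",
--         "winerror 10061",
--         "err_connection_refused",
--         "err_connection_reset",
--         "err_connection_timed_out",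
--         "err_empty_response",
--         "read timed out",
--         "connect timeout",
--         "temporary failure in name resolution",
--         "name or service not known",
--         "network is unreachable",
--         "no se puede establecer una conexion",
--         "denego expresamente dicha conexion",
--         "se ha agotado el tiempo de espera",
--     ]
--     return any(marker in normalized for marker in markers)
--
-- def normalize_lookup_text(text):
--     normalized = unicodedata.normalize("NFKD", text or "")
--     no_accents = "".join(ch for ch in normalized if not unicodedata.combining(ch))
--     return no_accents.strip().lower()
-- ===== SOURCE B (Python) =====
-- import unicodedata
--
-- _MARKERS = [
--     "invalidjsonresponse",
--     "jsondecodeerror",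
--     "expecting value",
--     "content-type=text/html",
--     "connectionerror",
--     "proxyerror",
--     "newconnectionerror",
--     "httpsconnectionpool",
--     "max retries exceeded",
--     "failed to establish a new connection",
--     "connection refused",
--     "winerror 10061",
--     "err_connection_refused",
--     "err_connection_reset",
--     "err_connection_timed_out",
--     "err_empty_response",
--     "read timed out",
--     "connect timeout",
--     "temporary failure in name resolution",
--     "name or service not known",
--     "network is unreachable",
--     "no se puede establecer una conexion",
--     "denego expresamente dicha conexion",
--     "se ha agotado el tiempo de espera",
-- ]
--
-- # index the markers once by first character, so the text is scanned in ONE pass: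
-- # at each position only the markers starting with that character are tried
-- _BUCKETS = {}
-- for _m in _MARKERS:
--     _BUCKETS[_m[0]] = _BUCKETS.get(_m[0], []) + [_m]
--
--
-- def is_transient_network_failure(error_text):
--     nfkd = unicodedata.normalize("NFKD", error_text or "")
--     normalized = "".join(ch for ch in nfkd if not unicodedata.combining(ch)).strip().lower()
--     for i, ch in enumerate(normalized):
--         for m in _BUCKETS.get(ch, []):
--             if normalized.startswith(m, i):
--                 return True
--     return False
-- ===== Notes on version B (the rewrite author's own statement) =====
-- stated objective: alternative
-- what changed: Instead of scanning the normalized text once per marker with a substring containment test, B indexes the markers once by first character and makes a single left-to-right pass over the text, trying at each position only the markers whose first character matches before confirming with startswith.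
import Mathlib
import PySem

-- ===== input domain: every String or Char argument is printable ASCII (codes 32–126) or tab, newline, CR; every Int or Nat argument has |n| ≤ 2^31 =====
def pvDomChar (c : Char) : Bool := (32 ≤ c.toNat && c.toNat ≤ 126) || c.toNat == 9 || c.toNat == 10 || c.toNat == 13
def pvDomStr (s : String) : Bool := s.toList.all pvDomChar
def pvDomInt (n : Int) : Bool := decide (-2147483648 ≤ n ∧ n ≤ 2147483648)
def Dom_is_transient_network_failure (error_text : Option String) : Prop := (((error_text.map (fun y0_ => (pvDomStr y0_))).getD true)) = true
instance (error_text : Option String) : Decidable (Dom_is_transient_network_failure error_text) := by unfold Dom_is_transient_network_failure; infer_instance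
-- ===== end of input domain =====

-- B replaces A's per-marker substring scans by one left-to-right pass over the text with the markers
-- indexed once by first character (objective: alternative single-pass scan; return value only, no side effects).

-- ===== PORT A =====

def pvMarkers : List String := [
  "invalidjsonresponse",
  "jsondecodeerror",
  "expecting value",
  "content-type=text/html",
  "connectionerror",
  "proxyerror",
  "newconnectionerror",
  "httpsconnectionpool",
  "max retries exceeded",
  "failed to establish a new connection",
  "connection refused",
  "winerror 10061",
  "err_connection_refused",
  "err_connection_reset",
  "err_connection_timed_out",
  "err_empty_response",
  "read timed out",
  "connect timeout",
  "temporary failure in name resolution",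
  "name or service not known",
  "network is unreachable",
  "no se puede establecer una conexion",
  "denego expresamente dicha conexion",
  "se ha agotado el tiempo de espera"]

-- normalize_lookup_text: on the printable-ASCII domain, unicodedata.normalize("NFKD", ·) is the
-- identity and no character is combining, so the NFKD step and the combining-filter keep the text
-- unchanged (exact on Dom); the remaining .strip().lower() is ported with PySem.
def normalize_lookup_text (text : Option String) : String :=
  PySem.Str.lower (PySem.Str.strip (text.getD ""))

def is_transient_network_failure (error_text : Option String) : Bool :=
  let normalized := normalize_lookup_text error_text
  pvMarkers.any (fun marker => PySem.Str.isIn marker normalized)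

-- ===== PORT B =====

def pvMarkersL : List (List Char) := pvMarkers.map String.toList

-- _BUCKETS: marker lists grouped by first character (the module-level loop of Source B)
def pvBuckets : PySem.Dict Char (List (List Char)) :=
  pvMarkersL.foldl (fun d m => d.modify (m.headD ' ') [] (· ++ [m])) PySem.Dict.empty

-- the `for i, ch in enumerate(normalized)` loop of Source B: recursion over the suffixes of the text;
-- `normalized.startswith(m, i)` is `startswith` on the suffix starting at i
def pvScan : List Char → Bool
  | [] => false
  | c :: rest =>
    if (pvBuckets.getD c []).any (fun m => PySem.Chars.startswith (c :: rest) m) then true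
    else pvScan rest

def is_transient_network_failure_alt (error_text : Option String) : Bool :=
  -- same normalization as A's normalize_lookup_text (NFKD/combining are no-ops on Dom), on List Char
  let normalized := PySem.Chars.lower (PySem.Chars.strip (error_text.getD "").toList)
  pvScan normalized

-- ===== PRECONDITION & SPEC =====
def Spec_is_transient_network_failure (error_text : Option String) (out : Bool) : Prop := out = is_transient_network_failure_alt error_text
instance (error_text : Option String) (out : Bool) : Decidable (Spec_is_transient_network_failure error_text out) := by unfold Spec_is_transient_network_failure; infer_instance

-- ===== CLAIM (what is proved, stated in full; the proofs are below) =====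
def Claim_equal_is_transient_network_failure : Prop := ∀ (error_text : Option String), Dom_is_transient_network_failure error_text → Spec_is_transient_network_failure error_text (is_transient_network_failure error_text)

-- ===== LEMMAS AND PROOFS =====

theorem pvMarkersL_ne_nil : ∀ m ∈ pvMarkersL, m ≠ [] := by decide

theorem pvBuckets_getD (c : Char) :
    pvBuckets.getD c [] = pvMarkersL.filter (fun m => m.headD ' ' == c) := by
  unfold pvBuckets
  have h := PySem.Dict.getD_foldl_modify_append (l := pvMarkersL.map (fun m => (m.headD ' ', m))) (d := PySem.Dict.empty) (c := c)
  rw [List.foldl_map] at h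
  simp only [h, PySem.Dict.getD_empty, List.nil_append, List.filter_map, List.map_map]
  simp only [Function.comp_def]
  rw [List.map_id']

theorem pvBucket_any_iff (c : Char) (rest : List Char) :
    ((pvBuckets.getD c []).any (fun m => PySem.Chars.startswith (c :: rest) m) = true)
    ↔ ∃ m ∈ pvMarkersL, m <+: (c :: rest) := by
  rw [pvBuckets_getD]
  simp only [List.any_eq_true, List.mem_filter, PySem.Chars.startswith_iff]
  constructor
  · rintro ⟨m, ⟨hm, _⟩, hp⟩; exact ⟨m, hm, hp⟩
  · rintro ⟨m, hm, hp⟩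
    refine ⟨m, ⟨hm, ?_⟩, hp⟩
    cases m with
    | nil => exact absurd rfl (pvMarkersL_ne_nil [] hm)
    | cons a t =>
      obtain ⟨u, hu⟩ := hp
      simp only [List.cons_append, List.cons.injEq] at hu
      simp [List.headD, hu.1]

theorem pvScan_iff (s : List Char) : pvScan s = true ↔ ∃ m ∈ pvMarkersL, m <:+: s := by
  induction s with
  | nil =>
    simp only [pvScan, Bool.false_eq_true, false_iff]
    rintro ⟨m, hm, hinf⟩
    exact pvMarkersL_ne_nil m hm (List.infix_nil.mp hinf)
  | cons c rest ih =>
    rw [pvScan]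
    split_ifs with h
    · simp only [true_iff]
      obtain ⟨m, hm, hp⟩ := (pvBucket_any_iff c rest).mp h
      exact ⟨m, hm, hp.isInfix⟩
    · rw [ih]
      have h' := (pvBucket_any_iff c rest).not.mp (by simpa using h)
      constructor
      · rintro ⟨m, hm, hi⟩; exact ⟨m, hm, (List.infix_cons_iff.mpr (Or.inr hi))⟩
      · rintro ⟨m, hm, hi⟩
        rcases List.infix_cons_iff.mp hi with hp | hi'
        · exact absurd ⟨m, hm, hp⟩ h'
        · exact ⟨m, hm, hi'⟩

-- ===== VERDICT (by name: the statement is the Claim_ definition above) =====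
theorem is_transient_network_failure_spec : Claim_equal_is_transient_network_failure := by
  intro e _
  unfold Spec_is_transient_network_failure is_transient_network_failure is_transient_network_failure_alt
  have hnorm : (normalize_lookup_text e).toList
      = PySem.Chars.lower (PySem.Chars.strip (e.getD "").toList) := by
    simp [normalize_lookup_text]
  rw [Bool.eq_iff_iff, List.any_eq_true, pvScan_iff]
  simp only [PySem.Str.isIn_iff_infix, hnorm, pvMarkersL, List.mem_map]
  constructor
  · rintro ⟨m, hm, hi⟩; exact ⟨m.toList, ⟨m, hm, rfl⟩, hi⟩
  · rintro ⟨_, ⟨m, hm, rfl⟩, hi⟩; exact ⟨m, hm, hi⟩
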